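-- pv_equiv track=rewrite | github.com/Adya6714/FraudScope360 | data_ingest/simulate.py | simulate_tickets
-- ===== SOURCE A (Python) =====
-- def simulate_tickets(n=100):
--     tickets = []
--     for i in range(n):
--         if i % 2 == 0:
--             msg = "Transaction flagged as unusual by user"
--         else:
--             msg = "Unable to access account after suspected fraud"
--         tickets.append(msg)
--     return tickets
-- ===== SOURCE B (Python) =====
-- def simulate_tickets(n=100):
--     return (["Transaction flagged as unusual by user",
--              "Unable to access account after suspected fraud"] * ((n + 1) // 2))[:n]
-- ===== Notes on version B (the rewrite author's own statement) =====
-- stated objective: idiomatic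
-- what changed: Replaces the indexed loop with a per-iteration parity branch by repeating the pair of messages enough times and truncating with a slice.
import Mathlib
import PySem

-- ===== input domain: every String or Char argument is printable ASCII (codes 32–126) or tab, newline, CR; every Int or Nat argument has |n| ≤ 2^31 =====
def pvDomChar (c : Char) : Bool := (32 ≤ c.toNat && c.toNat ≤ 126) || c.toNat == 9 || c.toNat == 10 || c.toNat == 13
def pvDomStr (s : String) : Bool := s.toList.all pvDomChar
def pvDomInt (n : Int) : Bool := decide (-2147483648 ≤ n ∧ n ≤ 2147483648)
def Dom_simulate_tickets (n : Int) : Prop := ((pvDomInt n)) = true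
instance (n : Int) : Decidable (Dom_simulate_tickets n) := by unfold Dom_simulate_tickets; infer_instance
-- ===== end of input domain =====

-- B builds the list by repeating the 2-message pattern (n+1)//2 times and slicing to n,
-- instead of A's indexed loop with a parity branch; same output, same O(n) cost (objective: idiomatic).

-- ===== PORT A =====
def simulate_tickets (n : Int) : List String :=
  (PySem.List.pyRange 0 n 1).foldl
    (fun tickets i =>
      let msg := if PySem.Int.mod i 2 == 0
        then "Transaction flagged as unusual by user"
        else "Unable to access account after suspected fraud"
      tickets ++ [msg])
    []

-- ===== PORT B =====
-- Python 'pattern * k' (k = (n+1)//2; empty for k ≤ 0) is ported as flatten/replicate on k.toNat;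
-- '[:n]' is PySem.List.slice with no start bound.
def simulate_tickets_alt (n : Int) : List String :=
  PySem.List.slice
    (List.flatten (List.replicate (PySem.Int.floordiv (n + 1) 2).toNat
      ["Transaction flagged as unusual by user",
       "Unable to access account after suspected fraud"]))
    none (some n)

-- ===== PRECONDITION & SPEC =====
def Spec_simulate_tickets (n : Int) (out : List String) : Prop := out = simulate_tickets_alt n
instance (n : Int) (out : List String) : Decidable (Spec_simulate_tickets n out) := by unfold Spec_simulate_tickets; infer_instance

-- ===== CLAIM (what is proved, stated in full; the proofs are below) =====
def Claim_equal_simulate_tickets : Prop := ∀ (n : Int), Dom_simulate_tickets n → Spec_simulate_tickets n (simulate_tickets n)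

-- ===== LEMMAS AND PROOFS =====

def pvMsg (k : Nat) : String :=
  if k % 2 == 0 then "Transaction flagged as unusual by user"
  else "Unable to access account after suspected fraud"

theorem pv_foldl_append {α β : Type} (f : α → β) :
    ∀ (l : List α) (init : List β),
      l.foldl (fun acc x => acc ++ [f x]) init = init ++ l.map f := by
  intro l
  induction l with
  | nil => simp
  | cons x xs ih => intro init; simp [List.foldl, ih]

theorem pv_A_eq (n : Int) :
    simulate_tickets n = (List.range n.toNat).map pvMsg := by
  unfold simulate_tickets
  rw [PySem.List.pyRange_one]
  refine (pv_foldl_append (f := fun i : Int =>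
      if PySem.Int.mod i 2 == 0 then "Transaction flagged as unusual by user"
      else "Unable to access account after suspected fraud") _ []).trans ?_
  simp only [List.nil_append, List.map_map, Int.sub_zero]
  apply List.map_congr_left
  intro k _
  simp only [Function.comp, zero_add, pvMsg]
  have hmod : PySem.Int.mod (k : Int) 2 = ((k % 2 : Nat) : Int) := by
    exact_mod_cast PySem.Int.mod_natCast k 2
  rw [hmod]
  by_cases h : k % 2 = 0
  · simp [h]
  · simp [h]; omega

theorem pv_flatten_eq (h : Nat) :
    List.flatten (List.replicate h
      ["Transaction flagged as unusual by user",
       "Unable to access account after suspected fraud"])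
    = (List.range (2 * h)).map pvMsg := by
  induction h with
  | zero => simp
  | succ m ih =>
      rw [List.replicate_succ', List.flatten_append, ih]
      have : 2 * (m + 1) = (2 * m) + 1 + 1 := by omega
      rw [this, List.range_succ, List.range_succ, List.map_append, List.map_append]
      simp [pvMsg, List.flatten]

-- ===== VERDICT (by name: the statement is the Claim_ definition above) =====
theorem simulate_tickets_spec : Claim_equal_simulate_tickets := by
  intro n _
  unfold Spec_simulate_tickets simulate_tickets_alt
  rw [pv_A_eq, pv_flatten_eq]
  by_cases hn : 0 ≤ n
  · rw [PySem.List.slice_to _ hn]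
    rw [← List.map_take, List.take_range]
    congr 1
    have h2 : PySem.Int.floordiv (n + 1) 2 = (n + 1) / 2 :=
      PySem.Int.floordiv_eq_ediv_of_pos (by omega)
    rw [h2]
    have hmin : min n.toNat (2 * ((n + 1) / 2).toNat) = n.toNat := by omega
    rw [hmin]
  · have h0 : (PySem.Int.floordiv (n + 1) 2).toNat = 0 := by
      have h2 : PySem.Int.floordiv (n + 1) 2 = (n + 1) / 2 :=
        PySem.Int.floordiv_eq_ediv_of_pos (by omega)
      rw [h2]; omega
    rw [h0]
    have hn0 : n.toNat = 0 := by omega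
    rw [hn0]
    simp [PySem.List.slice]
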